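-- pv_equiv track=rewrite | github.com/SaiKrishna-KK/aurora-search-engine | search_engine.py | _score_and_sort
-- ===== SOURCE A (Python) =====
-- from typing import List, Dict
--
-- def _score_and_sort(results: List[Dict], query_words: List[str], result_type: str) -> List[Dict]:
--     """
--     Score results by how many query words they contain and sort by score.
--     """
--     scored_results = []
--
--     for item in results:
--         if result_type == "message":
--             text = f"{item.get('message', '')} {item.get('user_name', '')}"
--         else:  # movie
--             text = f"{item.get('title', '')} {item.get('description', '')}"
--
--         text_lower = text.lower()
--
--         # Count how many query words appear in the text
--         score = sum(1 for word in query_words if word in text_lower)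
--
--         scored_results.append((score, item))
--
--     # Sort by score (descending)
--     scored_results.sort(key=lambda x: x[0], reverse=True)
--
--     # Return just the items without scores
--     return [item for score, item in scored_results]
-- ===== SOURCE B (Python) =====
-- from typing import List, Dict
--
-- def _score_and_sort(results: List[Dict], query_words: List[str], result_type: str) -> List[Dict]:
--     """
--     Counting sort: hoist the key pair out of the loop, count matches with an
--     accumulator, drop each item into a fixed-size score-indexed bucket array,
--     then emit the buckets from highest score to lowest.
--     """
--     if result_type == "message":
--         keys = ("message", "user_name")
--     else:
--         keys = ("title", "description")
--
--     n = len(query_words)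
--     buckets = [[] for _ in range(n + 1)]
--
--     for item in results:
--         text = f"{item.get(keys[0], '')} {item.get(keys[1], '')}".lower()
--         score = 0
--         for w in query_words:
--             if w in text:
--                 score += 1
--         buckets[score].append(item)
--
--     out = []
--     for b in reversed(buckets):
--         out.extend(b)
--     return out
-- ===== Notes on version B (the rewrite author's own statement) =====
-- stated objective: alternative
-- what changed: Replaces the collect-pairs-then-stable-reverse-comparison-sort with a counting sort: the key pair is chosen once before the loop, the score is accumulated with an explicit counter loop, each item is appended to a fixed-size score-indexed bucket array, and the output is emitted by sweeping the buckets from highest score down.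
import Mathlib
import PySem

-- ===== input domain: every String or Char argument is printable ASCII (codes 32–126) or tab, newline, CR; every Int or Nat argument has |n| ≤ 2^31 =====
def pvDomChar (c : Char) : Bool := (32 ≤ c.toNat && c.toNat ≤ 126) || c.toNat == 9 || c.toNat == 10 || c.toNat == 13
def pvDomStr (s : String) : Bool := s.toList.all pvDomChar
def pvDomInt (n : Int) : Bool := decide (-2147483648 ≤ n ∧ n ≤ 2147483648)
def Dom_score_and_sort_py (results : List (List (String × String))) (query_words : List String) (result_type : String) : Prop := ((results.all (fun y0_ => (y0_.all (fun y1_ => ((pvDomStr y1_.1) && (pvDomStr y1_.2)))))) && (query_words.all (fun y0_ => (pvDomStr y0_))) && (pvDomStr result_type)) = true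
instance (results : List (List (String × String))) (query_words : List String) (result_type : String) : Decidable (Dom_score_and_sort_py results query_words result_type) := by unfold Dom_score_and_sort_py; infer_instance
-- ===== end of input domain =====

-- B replaces A's stable reverse sort of (score, item) pairs by a counting sort into a
-- fixed-size score-indexed bucket array swept high-to-low (same output, no speed claim).

-- ===== PORT A =====
-- f"{item.get('message','')} {item.get('user_name','')}" — ASCII-exact string concatenation;
-- each Python dict arrives as its items association list (unique keys), wrapped as PySem.Dict.
def pvTextA (result_type : String) (item : List (String × String)) : String :=
  if result_type == "message" then
    (PySem.Dict.mk item).getD "message" "" ++ " " ++ (PySem.Dict.mk item).getD "user_name" ""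
  else
    (PySem.Dict.mk item).getD "title" "" ++ " " ++ (PySem.Dict.mk item).getD "description" ""

-- score = sum(1 for word in query_words if word in text_lower)
def pvScoreA (query_words : List String) (result_type : String) (item : List (String × String)) : Int :=
  let text_lower := PySem.Str.lower (pvTextA result_type item)
  ((query_words.filter (fun word => PySem.Str.isIn word text_lower)).map (fun _ => (1 : Int))).sum

def score_and_sort_py (results : List (List (String × String))) (query_words : List String) (result_type : String) : List (List (String × String)) :=
  let scored_results := results.foldl
    (fun acc item => acc ++ [(pvScoreA query_words result_type item, item)]) []
  -- scored_results.sort(key=lambda x: x[0], reverse=True); return [item for score, item in …]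
  (PySem.List.sorted scored_results (fun p => p.1) true).map (fun p => p.2)

-- ===== PORT B =====
def score_and_sort_py_alt (results : List (List (String × String))) (query_words : List String) (result_type : String) : List (List (String × String)) :=
  -- keys = ("message","user_name") if … else ("title","description")  — hoisted out of the loop
  let keys : String × String :=
    if result_type == "message" then ("message", "user_name") else ("title", "description")
  let n := query_words.length
  -- buckets = [[] for _ in range(n + 1)]
  let buckets0 : List (List (List (String × String))) := List.replicate (n + 1) []
  let buckets := results.foldl
    (fun bs item =>
      let text := PySem.Str.lower
        ((PySem.Dict.mk item).getD keys.1 "" ++ " " ++ (PySem.Dict.mk item).getD keys.2 "")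
      -- score = 0; for w in query_words: if w in text: score += 1
      let score := query_words.foldl
        (fun s w => if PySem.Str.isIn w text then s + 1 else s) (0 : Int)
      -- buckets[score].append(item) — score is a count, always 0 ≤ score ≤ n, so the
      -- in-range Nat index is exact Python indexing
      bs.set score.toNat (bs.getD score.toNat [] ++ [item]))
    buckets0
  -- out = []; for b in reversed(buckets): out.extend(b)
  buckets.reverse.foldl (fun out b => out ++ b) []

-- ===== PRECONDITION & SPEC =====
def Spec_score_and_sort_py (results : List (List (String × String))) (query_words : List String) (result_type : String) (out : List (List (String × String))) : Prop := out = score_and_sort_py_alt results query_words result_type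
instance (results : List (List (String × String))) (query_words : List String) (result_type : String) (out : List (List (String × String))) : Decidable (Spec_score_and_sort_py results query_words result_type out) := by unfold Spec_score_and_sort_py; infer_instance

-- ===== CLAIM (what is proved, stated in full; the proofs are below) =====
def Claim_equal_score_and_sort_py : Prop := ∀ (results : List (List (String × String))) (query_words : List String) (result_type : String), Dom_score_and_sort_py results query_words result_type → Spec_score_and_sort_py results query_words result_type (score_and_sort_py results query_words result_type)

-- ===== LEMMAS AND PROOFS =====

-- the descending concatenation of score buckets: filter(score = n) ++ … ++ filter(score = 0)
def pvGather {α : Type} (xs : List (Int × α)) : Nat → List (Int × α)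
  | 0 => xs.filter (fun p => p.1 == (0 : Int))
  | s + 1 => xs.filter (fun p => p.1 == (s : Int) + 1) ++ pvGather xs s

theorem pvScore_bounds (query_words : List String) (result_type : String) (item : List (String × String)) :
    0 ≤ pvScoreA query_words result_type item ∧
      pvScoreA query_words result_type item ≤ (query_words.length : Int) := by
  unfold pvScoreA
  rw [PySem.List.sum_map_const_int]
  constructor
  · positivity
  · simp only [mul_one]
    exact_mod_cast List.length_filter_le _ query_words

theorem pvGather_nil {α : Type} (n : Nat) : pvGather ([] : List (Int × α)) n = [] := by
  induction n with
  | zero => rfl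
  | succ s ih => simp [pvGather, ih]

theorem mem_pvGather {α : Type} {xs : List (Int × α)} {n : Nat} {p : Int × α}
    (hp : p ∈ pvGather xs n) : 0 ≤ p.1 ∧ p.1 ≤ (n : Int) := by
  induction n with
  | zero =>
    simp only [pvGather, List.mem_filter, beq_iff_eq] at hp
    omega
  | succ s ih =>
    simp only [pvGather, List.mem_append, List.mem_filter, beq_iff_eq] at hp
    rcases hp with ⟨-, h⟩ | h
    · push_cast; omega
    · have := ih h; push_cast; omega

theorem pvGather_append_of_gt {α : Type} (xs : List (Int × α)) (x : Int × α) (n : Nat)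
    (hx : (n : Int) < x.1) : pvGather (xs ++ [x]) n = pvGather xs n := by
  induction n with
  | zero =>
    have : x.1 ≠ (0 : Int) := by omega
    simp [pvGather, List.filter_append, this]
  | succ s ih =>
    have hs : (s : Int) < x.1 := by push_cast at hx ⊢; omega
    have : x.1 ≠ (s : Int) + 1 := by push_cast at hx; omega
    simp [pvGather, List.filter_append, this, ih hs]

theorem pvInsertBy_nil {α : Type} (before : α → α → Bool) (x : α) :
    PySem.List.insertBy before x [] = [x] := rfl

theorem pvInsertBy_cons {α : Type} (before : α → α → Bool) (x y : α) (ys : List α) :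
    PySem.List.insertBy before x (y :: ys) =
      if before x y then x :: y :: ys else y :: PySem.List.insertBy before x ys := rfl

theorem pvInsertBy_skip {α : Type} (before : α → α → Bool) (x : α) (l r : List α)
    (hl : ∀ y ∈ l, before x y = false) :
    PySem.List.insertBy before x (l ++ r) = l ++ PySem.List.insertBy before x r := by
  induction l with
  | nil => simp
  | cons y l ih =>
    rw [List.cons_append, pvInsertBy_cons, hl y (by simp),
      ih (fun z hz => hl z (by simp [hz]))]
    simp

theorem pvInsertBy_front {α : Type} (before : α → α → Bool) (x : α) (r : List α)
    (hr : ∀ y ∈ r, before x y = true) :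
    PySem.List.insertBy before x r = x :: r := by
  cases r with
  | nil => rfl
  | cons y ys => rw [pvInsertBy_cons, hr y (by simp)]; simp

theorem pvInsertBy_gather {α : Type} (xs : List (Int × α)) (x : Int × α) (n : Nat)
    (h0 : 0 ≤ x.1) (hn : x.1 ≤ (n : Int)) :
    PySem.List.insertBy (fun a b : Int × α => decide (b.1 < a.1)) x (pvGather xs n) =
      pvGather (xs ++ [x]) n := by
  induction n with
  | zero =>
    have hx : x.1 = (0 : Int) := by omega
    have hl : ∀ y ∈ xs.filter (fun p => p.1 == (0 : Int)),
        (fun a b : Int × α => decide (b.1 < a.1)) x y = false := by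
      intro y hy
      simp only [List.mem_filter, beq_iff_eq] at hy
      simp [hy.2, hx]
    have := pvInsertBy_skip (fun a b : Int × α => decide (b.1 < a.1)) x
      (xs.filter (fun p => p.1 == (0 : Int))) [] hl
    simp only [List.append_nil] at this
    rw [pvGather, this, pvInsertBy_nil, pvGather, List.filter_append]
    simp [hx]
  | succ s ih =>
    by_cases hx : x.1 = (s : Int) + 1
    · have hl : ∀ y ∈ xs.filter (fun p => p.1 == (s : Int) + 1),
          (fun a b : Int × α => decide (b.1 < a.1)) x y = false := by
        intro y hy
        simp only [List.mem_filter, beq_iff_eq] at hy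
        simp [hy.2, hx]
      have hr : ∀ y ∈ pvGather xs s,
          (fun a b : Int × α => decide (b.1 < a.1)) x y = true := by
        intro y hy
        have := mem_pvGather hy
        simp only [decide_eq_true_eq]
        omega
      rw [pvGather, pvInsertBy_skip _ _ _ _ hl, pvInsertBy_front _ _ _ hr,
        pvGather, List.filter_append, pvGather_append_of_gt xs x s (by omega)]
      simp [hx]
    · have hxs : x.1 ≤ (s : Int) := by push_cast at hn; omega
      have hl : ∀ y ∈ xs.filter (fun p => p.1 == (s : Int) + 1),
          (fun a b : Int × α => decide (b.1 < a.1)) x y = false := by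
        intro y hy
        simp only [List.mem_filter, beq_iff_eq] at hy
        simp only [decide_eq_false_iff_not, not_lt, hy.2]
        omega
      rw [pvGather, pvInsertBy_skip _ _ _ _ hl, ih hxs, pvGather, List.filter_append]
      simp [hx]

theorem pvSorted_eq_gather {α : Type} (xs : List (Int × α)) (n : Nat)
    (h : ∀ p ∈ xs, 0 ≤ p.1 ∧ p.1 ≤ (n : Int)) :
    PySem.List.sorted xs (fun p => p.1) true = pvGather xs n := by
  rw [PySem.List.sorted_rev_eq_foldl_insertBy]
  induction xs using List.reverseRecOn with
  | nil => simpa using (pvGather_nil n).symm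
  | append_singleton xs x ih =>
    rw [List.foldl_append, List.foldl_cons, List.foldl_nil,
      ih (fun p hp => h p (by simp [hp])),
      pvInsertBy_gather xs x n (h x (by simp)).1 (h x (by simp)).2]

-- B's counter loop computes A's filter-and-sum score
theorem pvCount_eq_sum {α : Type} (p : α → Bool) (ws : List α) (acc : Int) :
    ws.foldl (fun s w => if p w then s + 1 else s) acc =
      acc + ((ws.filter p).map (fun _ => (1 : Int))).sum := by
  induction ws generalizing acc with
  | nil => simp
  | cons w ws ih =>
    by_cases h : p w = true
    · simp [h, ih]; ring
    · simp [h, ih]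

-- the bucket list after B's fold, as a function of the scored pairs
theorem pvBuckets_eq {α : Type} (n : Nat) (xs : List (Int × α))
    (h : ∀ p ∈ xs, 0 ≤ p.1 ∧ p.1 ≤ (n : Int)) :
    xs.foldl (fun bs p => bs.set p.1.toNat (bs.getD p.1.toNat [] ++ [p.2]))
        (List.replicate (n + 1) ([] : List α)) =
      (List.range (n + 1)).map
        (fun (i : Nat) => (xs.filter (fun p => p.1 == (i : Int))).map (fun p => p.2)) := by
  induction xs using List.reverseRecOn with
  | nil =>
    apply List.ext_getElem
    · simp
    · intro i h1 h2
      simp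
  | append_singleton xs x ih =>
    rw [List.foldl_append, List.foldl_cons, List.foldl_nil,
      ih (fun p hp => h p (by simp [hp]))]
    have hx0 : 0 ≤ x.1 := (h x (by simp)).1
    have hxn : x.1.toNat ≤ n := by
      have := (h x (by simp)).2; omega
    apply List.ext_getElem
    · simp
    · intro i h1 h2
      have hi : i < n + 1 := by simpa using h2
      have hlen : x.1.toNat < ((List.range (n + 1)).map
          (fun (i : Nat) => (xs.filter (fun p => p.1 == (i : Int))).map (fun p => p.2))).length := by
        simp; omega
      rw [List.getElem_set]
      by_cases hix : i = x.1.toNat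
      · subst hix
        rw [if_pos rfl, List.getD_eq_getElem _ _ hlen]
        simp only [List.getElem_map, List.getElem_range]
        have hcast : ((x.1.toNat : Nat) : Int) = x.1 := by omega
        simp [List.filter_append, hcast]
      · rw [if_neg (by omega)]
        simp only [List.getElem_map, List.getElem_range, List.filter_append]
        have : (x.1 == (i : Int)) = false := by
          simp only [beq_eq_false_iff_ne, ne_eq]
          omega
        simp [this]

-- the reverse sweep over the bucket list is pvGather's items
theorem pvSweep_flatten {α : Type} (acc : List α) (bs : List (List α)) :
    bs.foldl (fun out b => out ++ b) acc = acc ++ bs.flatten := by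
  induction bs generalizing acc with
  | nil => simp
  | cons b bs ih => simp [ih]

theorem pvRevBuckets_eq_gather {α : Type} (xs : List (Int × α)) (n : Nat) :
    (((List.range (n + 1)).map
        (fun (i : Nat) => (xs.filter (fun p => p.1 == (i : Int))).map (fun p => p.2))).reverse).flatten =
      (pvGather xs n).map (fun p => p.2) := by
  induction n with
  | zero => simp [pvGather]
  | succ s ih =>
    rw [List.range_succ, List.map_append, List.reverse_append]
    simp only [List.map_cons, List.map_nil, List.reverse_cons, List.reverse_nil,
      List.nil_append, List.singleton_append, List.flatten_cons]
    rw [ih]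
    have hcast : ((s + 1 : Nat) : Int) = (s : Int) + 1 := by push_cast; ring
    simp [pvGather, hcast]

-- ===== VERDICT (by name: the statement is the Claim_ definition above) =====
theorem score_and_sort_py_spec : Claim_equal_score_and_sort_py := by
  intro results query_words result_type _
  unfold Spec_score_and_sort_py score_and_sort_py score_and_sort_py_alt
  -- B's inner text+counter loop computes exactly pvScoreA
  have hscore : ∀ item : List (String × String),
      query_words.foldl
        (fun s w => if PySem.Str.isIn w
          (PySem.Str.lower
            ((PySem.Dict.mk item).getD
                (if result_type == "message" then ("message", "user_name")
                 else ("title", "description")).1 "" ++ " " ++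
              (PySem.Dict.mk item).getD
                (if result_type == "message" then ("message", "user_name")
                 else ("title", "description")).2 "")) then s + 1 else s) (0 : Int) =
      pvScoreA query_words result_type item := by
    intro item
    rw [pvCount_eq_sum]
    unfold pvScoreA pvTextA
    by_cases h : (result_type == "message") = true
    · simp only [h, if_true]
      simp
    · simp only [h]
      simp
  simp only [hscore]
  rw [PySem.List.foldl_append_singleton_eq_map
    (fun item => (pvScoreA query_words result_type item, item)) results []]
  rw [List.nil_append]
  set scored := results.map (fun item => (pvScoreA query_words result_type item, item)) with hscored
  have hmem : ∀ p ∈ scored, 0 ≤ p.1 ∧ p.1 ≤ (query_words.length : Int) := by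
    intro p hp
    rw [hscored] at hp
    simp only [List.mem_map] at hp
    obtain ⟨item, -, rfl⟩ := hp
    exact pvScore_bounds query_words result_type item
  have hfold : results.foldl
      (fun bs item => bs.set (pvScoreA query_words result_type item).toNat
        (bs.getD (pvScoreA query_words result_type item).toNat [] ++ [item]))
      (List.replicate (query_words.length + 1) []) =
      scored.foldl (fun bs p => bs.set p.1.toNat (bs.getD p.1.toNat [] ++ [p.2]))
        (List.replicate (query_words.length + 1) []) := by
    rw [hscored, List.foldl_map]
  rw [hfold, pvBuckets_eq query_words.length scored hmem, pvSweep_flatten,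
    List.nil_append, pvRevBuckets_eq_gather scored query_words.length,
    pvSorted_eq_gather scored query_words.length hmem]
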